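-- pv_equiv track=rewrite | github.com/Agentic-Environmental-Engineering/GymVerse | gem/gem/envs/RLVE/cornfield_env.py | _compute_gold
-- ===== SOURCE A (Python) =====
-- from typing import Any, List, Optional, SupportsFloat, Tuple
--
-- def _compute_gold(H: List[int], K: int) -> int:
--     """
--     Compute the maximum achievable LNDS length after at most K range-increment operations,
--     using a 2-D Fenwick Tree (BIT) technique.
--
--     Args:
--         H: The initial heights array.
--         K: Maximum number of operations.
--
--     Returns:
--         The gold (optimal) LNDS length.
--     """
--     def lowbit(x: int) -> int:
--         return x & -x
--
--     def add(bit: List[List[int]], X: int, Y: int, x: int, y: int, value: int) -> None: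
--         while x <= X:
--             yy = y
--             row = bit[x]
--             while yy <= Y:
--                 if value > row[yy]:
--                     row[yy] = value
--                 yy += lowbit(yy)
--             x += lowbit(x)
--
--     def query(bit: List[List[int]], x: int, y: int) -> int:
--         res = 0
--         while x:
--             yy = y
--             row = bit[x]
--             while yy:
--                 v = row[yy]
--                 if v > res:
--                     res = v
--                 yy -= lowbit(yy)
--             x -= lowbit(x)
--         return res
--
--     max_height = max(H) if H else 0
--     X = K + 1
--     Y = max_height + K
--
--     # 2-D BIT initialized with 0 (1-based indexing)
--     BIT = [[0] * (Y + 2) for _ in range(X + 2)]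
--
--     answer = 0
--     for h in H:
--         for j in range(K, -1, -1):
--             cur_height = h + j
--             best = query(BIT, j + 1, cur_height) + 1
--             if best > answer:
--                 answer = best
--             add(BIT, X, Y, j + 1, cur_height, best)
--     return answer
-- ===== SOURCE B (Python) =====
-- def _compute_gold(H, K):
--     """Same result as A, but with a plain list of inserted points and a linear
--     dominance scan instead of a 2-D Fenwick tree."""
--     points = []  # (x, y, value) in insertion order
--     answer = 0
--     for h in H:
--         for j in range(K, -1, -1):
--             x = j + 1
--             y = h + j
--             best = 0
--             for (px, py, pv) in points:
--                 if px <= x and py <= y and pv > best: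
--                     best = pv
--             best += 1
--             if best > answer:
--                 answer = best
--             points.append((x, y, best))
--     return answer
-- ===== Notes on version B (the rewrite author's own statement) =====
-- stated objective: simpler
-- what changed: Replaced the 2-D Fenwick (BIT) max-structure with a plain list of inserted (x, y, value) points; each query is a linear dominance scan over the stored points instead of BIT chain walks, removing the lowbit arithmetic and the (K+2)x(maxH+K+2) table.
import Mathlib
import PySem

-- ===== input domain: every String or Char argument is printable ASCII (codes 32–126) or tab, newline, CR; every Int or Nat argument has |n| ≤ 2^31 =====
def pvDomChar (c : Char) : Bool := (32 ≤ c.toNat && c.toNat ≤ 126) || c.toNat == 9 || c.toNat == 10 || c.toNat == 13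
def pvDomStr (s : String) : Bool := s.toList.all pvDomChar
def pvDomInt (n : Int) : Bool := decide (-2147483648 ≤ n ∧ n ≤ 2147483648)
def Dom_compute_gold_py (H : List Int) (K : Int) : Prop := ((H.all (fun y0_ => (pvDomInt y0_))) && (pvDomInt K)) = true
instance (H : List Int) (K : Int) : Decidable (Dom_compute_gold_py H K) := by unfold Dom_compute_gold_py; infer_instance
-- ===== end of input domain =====

-- B replaces A's 2-D Fenwick tree by a plain list of inserted points with a linear
-- dominance scan per query (objective: simpler; not faster).

-- ===== PORT A =====
-- lowbit(x) = x & -x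
def pvLowbit (x : Int) : Int := Int.land x (-x)

-- inner `while yy <= Y` loop of add; the fuel argument only makes the while-loop total,
-- on admitted inputs it is never exhausted.  Indices are nonnegative and in range on
-- admitted inputs, so `.toNat` + getD/set is exact there.
def pvAddRow (Y value : Int) : Nat → Int → List Int → List Int
  | 0, _, row => row
  | f+1, yy, row =>
    if yy ≤ Y then
      let row' := if value > row.getD yy.toNat 0 then row.set yy.toNat value else row
      pvAddRow Y value f (yy + pvLowbit yy) row'
    else row

-- outer `while x <= X` loop of add
def pvAdd (X Y y value : Int) : Nat → Int → List (List Int) → List (List Int)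
  | 0, _, b => b
  | f+1, x, b =>
    if x ≤ X then
      let row' := pvAddRow Y value (Y+2).toNat y (b.getD x.toNat [])
      pvAdd X Y y value f (x + pvLowbit x) (b.set x.toNat row')
    else b

-- inner `while yy:` loop of query
def pvQueryRow (row : List Int) : Nat → Int → Int → Int
  | 0, _, res => res
  | f+1, yy, res =>
    if yy ≠ 0 then
      let v := row.getD yy.toNat 0
      pvQueryRow row f (yy - pvLowbit yy) (if v > res then v else res)
    else res

-- outer `while x:` loop of query
def pvQuery (b : List (List Int)) (y : Int) : Nat → Int → Int → Int
  | 0, _, res => res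
  | f+1, x, res =>
    if x ≠ 0 then
      pvQuery b y f (x - pvLowbit x) (pvQueryRow (b.getD x.toNat []) (y.toNat+1) y res)
    else res

def compute_gold_py (H : List Int) (K : Int) : Int :=
  let max_height : Int := match PySem.List.max? H (fun x => x) with
    | some m => m
    | none => 0
  let X := K + 1
  let Y := max_height + K
  -- [[0]*(Y+2) for _ in range(X+2)] : the inner list is built once per row of the comprehension
  let BIT := (List.range (X+2).toNat).map (fun _ => List.replicate (Y+2).toNat (0 : Int))
  (H.foldl (fun (s : List (List Int) × Int) (h : Int) =>
    (PySem.List.pyRange K (-1) (-1)).foldl (fun (s : List (List Int) × Int) (j : Int) =>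
      let cur_height := h + j
      let best := pvQuery s.1 cur_height ((j+1).toNat+1) (j+1) 0 + 1
      let answer := if best > s.2 then best else s.2
      (pvAdd X Y cur_height best (X+2).toNat (j+1) s.1, answer)) s)
    (BIT, 0)).2

-- ===== PORT B =====
-- linear dominance scan over the list of inserted points
def pvScan (pts : List (Int × Int × Int)) (x y : Int) : Int :=
  pts.foldl (fun best p => if p.1 ≤ x ∧ p.2.1 ≤ y ∧ p.2.2 > best then p.2.2 else best) 0

def compute_gold_py_alt (H : List Int) (K : Int) : Int :=
  (H.foldl (fun (s : List (Int × Int × Int) × Int) (h : Int) =>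
    (PySem.List.pyRange K (-1) (-1)).foldl (fun (s : List (Int × Int × Int) × Int) (j : Int) =>
      let x := j + 1
      let y := h + j
      let best := pvScan s.1 x y + 1
      let answer := if best > s.2 then best else s.2
      (s.1 ++ [(x, y, best)], answer)) s)
    ([], 0)).2

-- ===== PRECONDITION & SPEC =====
-- Pre_ excludes inputs with K ≥ 0 and some height ≤ 0: there A never returns — its BIT
-- indices become zero or negative, so it either raises IndexError or loops forever.
def Pre_compute_gold_py (H : List Int) (K : Int) : Prop := K < 0 ∨ ∀ h ∈ H, 1 ≤ h
instance (H : List Int) (K : Int) : Decidable (Pre_compute_gold_py H K) := by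
  unfold Pre_compute_gold_py; infer_instance

def pvWitness_compute_gold_py : List Int × Int := ([1, 2], 1)

def Spec_compute_gold_py (H : List Int) (K : Int) (out : Int) : Prop := out = compute_gold_py_alt H K
instance (H : List Int) (K : Int) (out : Int) : Decidable (Spec_compute_gold_py H K out) := by unfold Spec_compute_gold_py; infer_instance

-- ===== CLAIM (what is proved, stated in full; the proofs are below) =====
def Claim_equal_compute_gold_py : Prop := ∀ (H : List Int) (K : Int), Dom_compute_gold_py H K → Pre_compute_gold_py H K → Spec_compute_gold_py H K (compute_gold_py H K)

-- ===== LEMMAS AND PROOFS =====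

theorem pv_ldiff_odd (m : Nat) (hm : m % 2 = 1) : Nat.ldiff m (m-1) = 1 := by
  apply Nat.eq_of_testBit_eq
  intro i
  rw [Nat.testBit_ldiff]
  cases i with
  | zero =>
      rw [Nat.testBit_zero, Nat.testBit_zero, Nat.testBit_zero]
      have h1 : (m-1) % 2 = 0 := by omega
      simp [hm, h1]
  | succ i =>
      rw [Nat.testBit_add_one, Nat.testBit_add_one, Nat.testBit_add_one]
      have h1 : (m-1)/2 = m/2 := by omega
      have h2 : (1:Nat)/2 = 0 := by norm_num
      rw [h1, h2, Nat.zero_testBit]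
      simp

theorem pv_ldiff_even (k : Nat) (hk : 0 < k) : Nat.ldiff (2*k) (2*k-1) = 2 * Nat.ldiff k (k-1) := by
  apply Nat.eq_of_testBit_eq
  intro i
  rw [Nat.testBit_ldiff]
  cases i with
  | zero =>
      rw [Nat.testBit_zero, Nat.testBit_zero, Nat.testBit_zero]
      have h1 : (2*k) % 2 = 0 := by omega
      have h2 : (2 * Nat.ldiff k (k-1)) % 2 = 0 := by omega
      simp [h1, h2]
  | succ i =>
      rw [Nat.testBit_add_one, Nat.testBit_add_one, Nat.testBit_add_one]
      have h1 : (2*k)/2 = k := by omega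
      have h2 : (2*k-1)/2 = k-1 := by omega
      have h3 : (2 * Nat.ldiff k (k-1))/2 = Nat.ldiff k (k-1) := by omega
      rw [h1, h2, h3, Nat.testBit_ldiff]

theorem pv_ldiff_spec (m : Nat) (h : 0 < m) :
    ∃ a : Nat, Nat.ldiff m (m-1) = 2^a ∧ 2^a ∣ m ∧ ¬ 2^(a+1) ∣ m := by
  induction m using Nat.strong_induction_on with
  | _ m ih =>
    rcases Nat.even_or_odd m with he | ho
    · have hm2 : m % 2 = 0 := Nat.even_iff.mp he
      obtain ⟨k, rfl⟩ : ∃ k, m = 2*k := ⟨m/2, by omega⟩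
      have hk : 0 < k := by omega
      obtain ⟨a, ha, hd, hnd⟩ := ih k (by omega) hk
      refine ⟨a+1, by rw [pv_ldiff_even k hk, ha, pow_succ]; ring, ?_, ?_⟩
      · obtain ⟨c, rfl⟩ := hd; exact ⟨c, by ring⟩
      · rintro ⟨c, hc⟩
        refine hnd ⟨c, ?_⟩
        have h2 : 2*k = 2*(2^(a+1)*c) := by rw [hc]; ring
        exact Nat.eq_of_mul_eq_mul_left (by norm_num) h2
    · have hm : m % 2 = 1 := Nat.odd_iff.mp ho
      refine ⟨0, ?_, one_dvd m, ?_⟩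
      · rw [pv_ldiff_odd m hm]; norm_num
      · rw [pow_one]; rintro ⟨c, rfl⟩; omega

theorem pvLowbit_spec (x : Int) (hx : 0 < x) :
    ∃ a : Nat, pvLowbit x = 2^a ∧ (2:Int)^a ∣ x ∧ ¬ (2:Int)^(a+1) ∣ x := by
  obtain ⟨m, rfl⟩ : ∃ m : Nat, x = Int.ofNat m := ⟨x.toNat, by
    rw [Int.ofNat_eq_natCast, Int.toNat_of_nonneg hx.le]⟩
  rw [Int.ofNat_eq_natCast] at hx ⊢
  have hm : 0 < m := by exact_mod_cast hx
  have hland : pvLowbit (m : Int) = ((Nat.ldiff m (m-1) : Nat) : Int) := by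
    obtain ⟨k, rfl⟩ := Nat.exists_eq_succ_of_ne_zero hm.ne'
    rfl
  obtain ⟨a, ha, hd, hnd⟩ := pv_ldiff_spec m hm
  refine ⟨a, ?_, ?_, ?_⟩
  · rw [hland, ha]; exact_mod_cast rfl
  · exact_mod_cast hd
  · intro h; exact hnd (by exact_mod_cast h)

theorem pvLowbit_pos (x : Int) (hx : 0 < x) : 0 < pvLowbit x := by
  obtain ⟨a, ha, -, -⟩ := pvLowbit_spec x hx
  rw [ha]; positivity

theorem pvLowbit_dvd (x : Int) (hx : 0 < x) : pvLowbit x ∣ x := by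
  obtain ⟨a, ha, hd, -⟩ := pvLowbit_spec x hx
  rw [ha]; exact hd

theorem pvLowbit_le (x : Int) (hx : 0 < x) : pvLowbit x ≤ x :=
  Int.le_of_dvd hx (pvLowbit_dvd x hx)

theorem pv_pow_dvd_lowbit (x : Int) (k : Nat) (hx : 0 < x) (h : (2:Int)^k ∣ x) :
    (2:Int)^k ∣ pvLowbit x := by
  obtain ⟨a, ha, hd, hnd⟩ := pvLowbit_spec x hx
  have hka : k ≤ a := by
    by_contra hlt
    exact hnd (dvd_trans (pow_dvd_pow 2 (by omega)) h)
  rw [ha]; exact pow_dvd_pow 2 hka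

theorem pv_lowbit_step_dvd (x : Int) (hx : 0 < x) :
    2 * pvLowbit x ∣ pvLowbit (x + pvLowbit x) := by
  obtain ⟨a, ha, hd, hnd⟩ := pvLowbit_spec x hx
  have hdd : (2:Int)^(a+1) ∣ x + pvLowbit x := by
    obtain ⟨c, hc⟩ := hd
    have hodd : ¬ (2:Int) ∣ c := by
      rintro ⟨d, rfl⟩
      exact hnd ⟨d, by rw [hc]; ring⟩
    obtain ⟨e, he⟩ : (2:Int) ∣ (c + 1) := by
      rcases Int.even_or_odd c with hce | hco
      · exact absurd hce.two_dvd hodd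
      · obtain ⟨d, hdc⟩ := hco
        exact ⟨d + 1, by omega⟩
    refine ⟨e, ?_⟩
    rw [ha, hc, pow_succ]
    have : c = 2 * e - 1 := by omega
    rw [this]; ring
  have h1 := pv_pow_dvd_lowbit (x + pvLowbit x) (a+1)
    (by have := pvLowbit_pos x hx; omega) hdd
  rw [ha] at h1 ⊢
  have h2 : (2:Int) * 2^a = 2^(a+1) := by ring
  rw [h2]; exact h1

theorem pv_core (p i : Int) (hp : 0 < p) (hpi : p < i) (hcov : i - pvLowbit i < p) :
    p + pvLowbit p ≤ i := by
  have hi : 0 < i := by omega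
  obtain ⟨e, he, hep, -⟩ := pvLowbit_spec p hp
  obtain ⟨a, ha, hai, -⟩ := pvLowbit_spec i hi
  have hnap : ¬ (2:Int)^a ∣ p := by
    intro hdvd
    have h1 : (2:Int)^a ∣ i - p := dvd_sub hai hdvd
    have h2 : (2:Int)^a ≤ i - p := Int.le_of_dvd (by omega) h1
    rw [ha] at hcov; omega
  have hea : e ≤ a := by
    by_contra hlt
    exact hnap (dvd_trans (pow_dvd_pow 2 (by omega)) hep)
  have h2ei : (2:Int)^e ∣ i := dvd_trans (pow_dvd_pow 2 hea) hai
  have h3 : (2:Int)^e ∣ i - p := dvd_sub h2ei hep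
  have h4 : (2:Int)^e ≤ i - p := Int.le_of_dvd (by omega) h3
  rw [he]; omega

def pvDchain (x : Int) : List Int :=
  if h : 0 < x then x :: pvDchain (x - pvLowbit x) else []
termination_by x.toNat
decreasing_by
  have h1 := pvLowbit_pos x h
  have h2 := pvLowbit_le x h
  omega

def pvUchain (X x : Int) : List Int :=
  if h : 0 < x ∧ x ≤ X then x :: pvUchain X (x + pvLowbit x) else []
termination_by (X + 1 - x).toNat
decreasing_by
  have h1 := pvLowbit_pos x h.1
  omega

def pvCovers (i p : Int) : Prop := p ≤ i ∧ i - pvLowbit i < p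

theorem pvDchain_mem (x : Int) : ∀ i ∈ pvDchain x, 0 < i ∧ i ≤ x := by
  induction x using pvDchain.induct with
  | case1 x h ih =>
      rw [pvDchain, dif_pos h]
      intro i hi
      rcases List.mem_cons.mp hi with rfl | hi
      · exact ⟨h, le_refl _⟩
      · have h2 := ih i hi
        have h3 := pvLowbit_pos x h
        omega
  | case2 x h =>
      rw [pvDchain, dif_neg h]
      simp

theorem pvDchain_cov (p : Int) (hp : 0 < p) : ∀ x, p ≤ x → ∃ i ∈ pvDchain x, pvCovers i p := by
  intro x
  induction x using pvDchain.induct with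
  | case1 x h ih =>
      intro hpx
      by_cases hc : x - pvLowbit x < p
      · exact ⟨x, by rw [pvDchain, dif_pos h]; exact List.mem_cons_self .., ⟨hpx, hc⟩⟩
      · obtain ⟨i, hmem, hcov⟩ := ih (by omega)
        exact ⟨i, by rw [pvDchain, dif_pos h]; exact List.mem_cons_of_mem _ hmem, hcov⟩
  | case2 x h =>
      intro hpx; omega

theorem pvUchain_mem (X : Int) : ∀ x, 0 < x → ∀ i ∈ pvUchain X x,
    x ≤ i ∧ i ≤ X ∧ pvLowbit x ∣ pvLowbit i ∧ i - pvLowbit i < x := by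
  intro x
  induction x using pvUchain.induct X with
  | case1 x h ih =>
      intro hx i hi
      rw [pvUchain, dif_pos h] at hi
      have hlbx := pvLowbit_pos x hx
      rcases List.mem_cons.mp hi with rfl | hi
      · exact ⟨le_refl _, h.2, dvd_refl _, by omega⟩
      · have hx' : 0 < x + pvLowbit x := by omega
        obtain ⟨h1, h2, h3, h4⟩ := ih hx' i hi
        have hstep := pv_lowbit_step_dvd x hx
        have hlbx' := pvLowbit_pos _ hx'
        have hi0 : 0 < i := by omega
        have hlbi := pvLowbit_pos i hi0
        refine ⟨by omega, h2, dvd_trans (dvd_trans ⟨2, by ring⟩ hstep) h3, ?_⟩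
        -- i - pvLowbit i < x
        have hd1 : pvLowbit (x + pvLowbit x) ∣ i - pvLowbit i :=
          dvd_sub (dvd_trans h3 (pvLowbit_dvd i hi0)) h3
        have hd2 : pvLowbit (x + pvLowbit x) ∣ (x + pvLowbit x) := pvLowbit_dvd _ hx'
        have hd3 : pvLowbit (x + pvLowbit x) ∣ (x + pvLowbit x) - (i - pvLowbit i) :=
          dvd_sub hd2 hd1
        have h2lb : 2 * pvLowbit x ≤ pvLowbit (x + pvLowbit x) :=
          Int.le_of_dvd hlbx' hstep
        have h5 : pvLowbit (x + pvLowbit x) ≤ (x + pvLowbit x) - (i - pvLowbit i) :=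
          Int.le_of_dvd (by omega) hd3
        omega
  | case2 x h =>
      intro _ i hi
      rw [pvUchain, dif_neg h] at hi
      simp at hi

theorem pvUchain_mem_of_cov (X : Int) : ∀ n : Nat, ∀ p i : Int, (i - p).toNat = n → 0 < p →
    i ≤ X → pvCovers i p → i ∈ pvUchain X p := by
  intro n
  induction n using Nat.strong_induction_on with
  | _ n ih =>
    intro p i hn hp hiX hcov
    obtain ⟨hpi, hlow⟩ := hcov
    rw [pvUchain, dif_pos ⟨hp, le_trans hpi hiX⟩]
    rcases eq_or_lt_of_le hpi with rfl | hlt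
    · exact List.mem_cons_self ..
    · have hcore := pv_core p i hp hlt hlow
      have hlbp := pvLowbit_pos p hp
      exact List.mem_cons_of_mem _
        (ih (i - (p + pvLowbit p)).toNat (by omega) (p + pvLowbit p) i rfl (by omega) hiX
          ⟨hcore, by omega⟩)

-- generic conditional max-fold lemmas
theorem pv_fold_le_self {α : Type} (P : α → Prop) [DecidablePred P] (f : α → Int) :
    ∀ (l : List α) (a : Int),
      a ≤ l.foldl (fun r x => if P x ∧ f x > r then f x else r) a := by
  intro l
  induction l with
  | nil => intro a; simp
  | cons x t ih =>
      intro a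
      simp only [List.foldl_cons]
      refine le_trans ?_ (ih _)
      split_ifs with h1
      · omega
      · exact le_refl _

theorem pv_fold_mem_le {α : Type} (P : α → Prop) [DecidablePred P] (f : α → Int)
    (l : List α) (x : α) (hx : x ∈ l) (hP : P x) :
    ∀ a, f x ≤ l.foldl (fun r y => if P y ∧ f y > r then f y else r) a := by
  induction l with
  | nil => cases hx
  | cons z t ih =>
      intro a
      simp only [List.foldl_cons]
      rcases List.mem_cons.mp hx with rfl | hx
      · refine le_trans ?_ (pv_fold_le_self P f t _)
        split_ifs with h1
        · exact le_refl _
        · have h2 : ¬ f x > a := fun hg => h1 ⟨hP, hg⟩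
          omega
      · exact ih hx _
      
theorem pv_fold_le {α : Type} (P : α → Prop) [DecidablePred P] (f : α → Int)
    (l : List α) (c : Int) (hc : ∀ x ∈ l, P x → f x ≤ c) :
    ∀ a, a ≤ c → l.foldl (fun r x => if P x ∧ f x > r then f x else r) a ≤ c := by
  induction l with
  | nil => intro a h; simpa using h
  | cons x t ih =>
      intro a h
      simp only [List.foldl_cons]
      refine ih (fun y hy => hc y (List.mem_cons_of_mem _ hy)) _ ?_
      split_ifs with h1
      · exact hc x (List.mem_cons_self ..) h1.1
      · exact h

def pvCell (b : List (List Int)) (i j : Int) : Int := (b.getD i.toNat []).getD j.toNat 0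

theorem pvDchain_nil (x : Int) (h : ¬ 0 < x) : pvDchain x = [] := by
  rw [pvDchain, dif_neg h]

theorem pvDchain_cons (x : Int) (h : 0 < x) : pvDchain x = x :: pvDchain (x - pvLowbit x) := by
  conv_lhs => rw [pvDchain]
  rw [dif_pos h]

theorem pvQueryRow_eq (row : List Int) : ∀ n : Nat, ∀ yy : Int, yy.toNat = n → 0 ≤ yy →
    ∀ fuel res, yy.toNat + 1 ≤ fuel →
    pvQueryRow row fuel yy res =
      (pvDchain yy).foldl (fun r j => if row.getD j.toNat 0 > r then row.getD j.toNat 0 else r) res := by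
  intro n
  induction n using Nat.strong_induction_on with
  | _ n ih =>
    intro yy hn hyy fuel res hfuel
    obtain ⟨f, rfl⟩ : ∃ f, fuel = f + 1 := ⟨fuel - 1, by omega⟩
    rcases eq_or_lt_of_le hyy with heq | hpos
    · rw [pvQueryRow, if_neg (by omega), pvDchain, dif_neg (by omega)]
      simp
    · rw [pvQueryRow, if_pos (by omega : yy ≠ 0), pvDchain, dif_pos hpos, List.foldl_cons]
      have hlb1 := pvLowbit_pos yy hpos
      have hlb2 := pvLowbit_le yy hpos
      exact ih (yy - pvLowbit yy).toNat (by omega) _ rfl (by omega) f _ (by omega)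

theorem pvQuery_eq (b : List (List Int)) (y : Int) (hy : 0 ≤ y) : ∀ n : Nat, ∀ x : Int,
    x.toNat = n → 0 ≤ x → ∀ fuel res, x.toNat + 1 ≤ fuel →
    pvQuery b y fuel x res =
      (pvDchain x).foldl (fun r i =>
        (pvDchain y).foldl (fun r' j => if pvCell b i j > r' then pvCell b i j else r') r) res := by
  intro n
  induction n using Nat.strong_induction_on with
  | _ n ih =>
    intro x hn hx fuel res hfuel
    obtain ⟨f, rfl⟩ : ∃ f, fuel = f + 1 := ⟨fuel - 1, by omega⟩
    rcases eq_or_lt_of_le hx with heq | hpos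
    · rw [pvQuery, if_neg (by omega), pvDchain_nil x (by omega)]
      simp
    · rw [pvQuery, if_pos (by omega : x ≠ 0), pvDchain_cons x hpos, List.foldl_cons]
      have hlb1 := pvLowbit_pos x hpos
      have hlb2 := pvLowbit_le x hpos
      rw [ih (x - pvLowbit x).toNat (by omega) _ rfl (by omega) f _ (by omega)]
      rw [pvQueryRow_eq (b.getD x.toNat []) y.toNat y rfl hy (y.toNat+1) res (by omega)]
      rfl



theorem pvUchain_nil (X x : Int) (h : ¬ (0 < x ∧ x ≤ X)) : pvUchain X x = [] := by
  rw [pvUchain, dif_neg h]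

theorem pvUchain_cons (X x : Int) (h : 0 < x ∧ x ≤ X) :
    pvUchain X x = x :: pvUchain X (x + pvLowbit x) := by
  conv_lhs => rw [pvUchain]
  rw [dif_pos h]

theorem pv_set_getD_eq (l : List Int) (n : Nat) (a : Int) (h : n < l.length) :
    (l.set n a).getD n 0 = a := by
  simp [List.getD_eq_getElem?_getD, h]

theorem pv_set_getD_ne (l : List Int) (n m : Nat) (a : Int) (h : n ≠ m) :
    (l.set n a).getD m 0 = l.getD m 0 := by
  simp [List.getD_eq_getElem?_getD, h]

theorem pv_set_getD_eq' (l : List (List Int)) (n : Nat) (a : List Int) (h : n < l.length) :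
    (l.set n a).getD n [] = a := by
  simp [List.getD_eq_getElem?_getD, h]

theorem pv_set_getD_ne' (l : List (List Int)) (n m : Nat) (a : List Int) (h : n ≠ m) :
    (l.set n a).getD m [] = l.getD m [] := by
  simp [List.getD_eq_getElem?_getD, h]

theorem pvAddRow_length (Y value : Int) : ∀ fuel (yy : Int) (row : List Int),
    (pvAddRow Y value fuel yy row).length = row.length := by
  intro fuel
  induction fuel with
  | zero => intro yy row; rfl
  | succ f ih =>
      intro yy row
      rw [pvAddRow]
      split_ifs with h h2 <;> simp [ih]

theorem pvAddRow_getD (Y value : Int) : ∀ n : Nat, ∀ yy : Int, (Y + 1 - yy).toNat = n → 0 < yy →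
    ∀ fuel row, n + 1 ≤ fuel → ∀ j : Int, 0 < j → j.toNat < row.length →
    (pvAddRow Y value fuel yy row).getD j.toNat 0 =
      if j ∈ pvUchain Y yy then (if value > row.getD j.toNat 0 then value else row.getD j.toNat 0)
      else row.getD j.toNat 0 := by
  intro n
  induction n using Nat.strong_induction_on with
  | _ n ih =>
    intro yy hn hyy fuel row hfuel j hj hjlen
    obtain ⟨f, rfl⟩ : ∃ f, fuel = f + 1 := ⟨fuel - 1, by omega⟩
    by_cases hY : yy ≤ Y
    · have hlb := pvLowbit_pos yy hyy
      rw [pvAddRow]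
      rw [if_pos hY, pvUchain_cons Y yy ⟨hyy, hY⟩]
      have hlen' : (if value > row.getD yy.toNat 0 then row.set yy.toNat value else row).length
          = row.length := by split_ifs <;> simp
      by_cases hjy : j = yy
      · subst hjy
        have hnot : j ∉ pvUchain Y (j + pvLowbit j) := by
          intro hmem
          have := (pvUchain_mem Y (j + pvLowbit j) (by omega) j hmem).1
          omega
        rw [ih (Y + 1 - (j + pvLowbit j)).toNat (by omega) _ rfl (by omega) f _ (by omega) j hj
          (by rw [hlen']; exact hjlen)]
        rw [if_neg hnot, if_pos (List.mem_cons_self ..)]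
        split_ifs with hv
        · exact pv_set_getD_eq row j.toNat value hjlen
        · rfl
      · have htn : yy.toNat ≠ j.toNat := by omega
        have hrow' : (if value > row.getD yy.toNat 0 then row.set yy.toNat value else row).getD j.toNat 0
            = row.getD j.toNat 0 := by
          split_ifs
          · exact pv_set_getD_ne row yy.toNat j.toNat value htn
          · rfl
        rw [ih (Y + 1 - (yy + pvLowbit yy)).toNat (by omega) _ rfl (by omega) f _ (by omega) j hj
          (by rw [hlen']; exact hjlen)]
        rw [hrow']
        have hmem : (j ∈ yy :: pvUchain Y (yy + pvLowbit yy)) ↔ j ∈ pvUchain Y (yy + pvLowbit yy) := by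
          constructor
          · intro h; rcases List.mem_cons.mp h with h | h
            · exact absurd h hjy
            · exact h
          · exact List.mem_cons_of_mem _
        by_cases hm : j ∈ pvUchain Y (yy + pvLowbit yy)
        · rw [if_pos hm, if_pos (hmem.mpr hm)]
        · rw [if_neg hm, if_neg (fun hc => hm (hmem.mp hc))]
    · rw [pvAddRow, if_neg hY, pvUchain_nil Y yy (by omega)]
      simp


def pvShape (b : List (List Int)) (X Y : Int) : Prop :=
  b.length = (X+2).toNat ∧ ∀ i : Nat, i < (X+2).toNat → (b.getD i []).length = (Y+2).toNat

theorem pvAdd_cell (X Y y v : Int) (hy : 0 < y) : ∀ n : Nat, ∀ x : Int, (X + 1 - x).toNat = n →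
    0 < x → ∀ fuel b, n + 1 ≤ fuel → pvShape b X Y →
    pvShape (pvAdd X Y y v fuel x b) X Y ∧
    ∀ i j : Int, 0 < i → i ≤ X → 0 < j → j ≤ Y →
    pvCell (pvAdd X Y y v fuel x b) i j =
      if i ∈ pvUchain X x ∧ j ∈ pvUchain Y y then (if v > pvCell b i j then v else pvCell b i j)
      else pvCell b i j := by
  intro n
  induction n using Nat.strong_induction_on with
  | _ n ih =>
    intro x hn hx fuel b hfuel hshape
    obtain ⟨f, rfl⟩ : ∃ f, fuel = f + 1 := ⟨fuel - 1, by omega⟩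
    by_cases hX : x ≤ X
    · have hlb := pvLowbit_pos x hx
      have hxlen : x.toNat < b.length := by rw [hshape.1]; omega
      set row := b.getD x.toNat [] with hrow
      have hrowlen : row.length = (Y+2).toNat := hshape.2 x.toNat (by omega)
      set row' := pvAddRow Y v (Y+2).toNat y row with hrow'
      have hrowlen' : row'.length = (Y+2).toNat := by
        rw [hrow', pvAddRow_length]; exact hrowlen
      have hshape' : pvShape (b.set x.toNat row') X Y := by
        constructor
        · rw [List.length_set, hshape.1]
        · intro i hi
          by_cases hix : i = x.toNat
          · subst hix; rw [pv_set_getD_eq' b x.toNat row' hxlen]; exact hrowlen'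
          · rw [pv_set_getD_ne' b x.toNat i row' (fun hc => hix hc.symm)]
            exact hshape.2 i hi
      rw [pvAdd, if_pos hX]
      obtain ⟨hsh2, hcell2⟩ := ih (X + 1 - (x + pvLowbit x)).toNat (by omega) _ rfl (by omega) f
        (b.set x.toNat row') (by omega) hshape'
      refine ⟨hsh2, ?_⟩
      intro i j hi hiX hj hjY
      rw [hcell2 i j hi hiX hj hjY]
      rw [pvUchain_cons X x ⟨hx, hX⟩]
      by_cases hix : i = x
      · subst hix
        have hnot : i ∉ pvUchain X (i + pvLowbit i) := by
          intro hmem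
          have := (pvUchain_mem X (i + pvLowbit i) (by omega) i hmem).1
          omega
        rw [if_neg (fun hc => hnot hc.1)]
        have hcell' : pvCell (b.set i.toNat row') i j = row'.getD j.toNat 0 := by
          unfold pvCell
          rw [pv_set_getD_eq' b i.toNat row' hxlen]
        rw [hcell']
        rw [hrow', pvAddRow_getD Y v (Y + 1 - y).toNat y rfl hy (Y+2).toNat row
          (by omega) j hj (by rw [hrowlen]; omega)]
        have hcell : pvCell b i j = row.getD j.toNat 0 := rfl
        rw [← hcell]
        by_cases hm : j ∈ pvUchain Y y <;> simp [hm]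
      · have hcell' : pvCell (b.set x.toNat row') i j = pvCell b i j := by
          unfold pvCell
          rw [pv_set_getD_ne' b x.toNat i.toNat row' (by omega)]
        rw [hcell']
        have hmem : (i ∈ x :: pvUchain X (x + pvLowbit x)) ↔ i ∈ pvUchain X (x + pvLowbit x) := by
          constructor
          · intro h; rcases List.mem_cons.mp h with h | h
            · exact absurd h hix
            · exact h
          · exact List.mem_cons_of_mem _
        simp only [hmem]
    · rw [pvAdd, if_neg hX, pvUchain_nil X x (by omega)]
      exact ⟨hshape, fun i j _ _ _ _ => by simp⟩


abbrev pvCoversP (i p : Int) : Prop := p ≤ i ∧ i - pvLowbit i < p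

def pvMaxCov (pts : List (Int × Int × Int)) (i j : Int) : Int :=
  pts.foldl (fun a p => if (pvCoversP i p.1 ∧ pvCoversP j p.2.1) ∧ p.2.2 > a then p.2.2 else a) 0

def pvInv (X Y : Int) (b : List (List Int)) (pts : List (Int × Int × Int)) : Prop :=
  pvShape b X Y ∧
  (∀ p ∈ pts, 1 ≤ p.1 ∧ p.1 ≤ X ∧ 1 ≤ p.2.1 ∧ p.2.1 ≤ Y) ∧
  ∀ i j : Int, 0 < i → i ≤ X → 0 < j → j ≤ Y → pvCell b i j = pvMaxCov pts i j

theorem pv_covers_iff_mem_uchain (X i p : Int) (hp : 0 < p) (hiX : i ≤ X) :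
    (i ∈ pvUchain X p) ↔ (pvCoversP i p) := by
  constructor
  · intro h
    obtain ⟨h1, _, _, h4⟩ := pvUchain_mem X p hp i h
    exact ⟨h1, h4⟩
  · intro h
    exact pvUchain_mem_of_cov X (i - p).toNat p i rfl hp hiX ⟨h.1, h.2⟩

theorem pv_fold_pairs (c : Int → Int → Int) (dcy : List Int) :
    ∀ (dcx : List Int) (res : Int),
    dcx.foldl (fun r i => dcy.foldl (fun r' j => if c i j > r' then c i j else r') r) res
      = (dcx.flatMap (fun i => dcy.map (fun j => (i, j)))).foldl
          (fun r q => if c q.1 q.2 > r then c q.1 q.2 else r) res := by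
  intro dcx
  induction dcx with
  | nil => intro res; simp
  | cons x t ih =>
      intro res
      simp only [List.foldl_cons, List.flatMap_cons, List.foldl_append, List.foldl_map, ih]

-- rewriting a plain max-fold as the conditional fold with trivial predicate
theorem pv_fold_true (c : Int → Int → Int) (l : List (Int × Int)) (res : Int) :
    l.foldl (fun r q => if c q.1 q.2 > r then c q.1 q.2 else r) res
      = l.foldl (fun r q => if (fun _ : Int × Int => True) q ∧ (fun q : Int × Int => c q.1 q.2) q > r
          then (fun q : Int × Int => c q.1 q.2) q else r) res := by
  simp

theorem pv_scan_shape (pts : List (Int × Int × Int)) (qx qy : Int) :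
    pvScan pts qx qy = pts.foldl (fun r p =>
      if (fun p : Int × Int × Int => p.1 ≤ qx ∧ p.2.1 ≤ qy) p ∧ (fun p : Int × Int × Int => p.2.2) p > r
        then (fun p : Int × Int × Int => p.2.2) p else r) 0 := by
  unfold pvScan
  congr 1
  funext a p
  by_cases h1 : p.1 ≤ qx <;> by_cases h2 : p.2.1 ≤ qy <;> simp [h1, h2]

theorem pv_foldl_congr {α β : Type} (f g : β → α → β) :
    ∀ (l : List α) (s : β), (∀ x ∈ l, ∀ a, f a x = g a x) → l.foldl f s = l.foldl g s := by
  intro l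
  induction l with
  | nil => intro s _; rfl
  | cons x t ih =>
      intro s h
      simp only [List.foldl_cons]
      rw [h x (List.mem_cons_self ..)]
      exact ih _ (fun z hz => h z (List.mem_cons_of_mem _ hz))

theorem pv_query_eq_scan (X Y qx qy : Int) (b : List (List Int)) (pts : List (Int × Int × Int))
    (hInv : pvInv X Y b pts) (hqx : 0 < qx) (hqxX : qx ≤ X) (hqy : 0 < qy) (hqyY : qy ≤ Y) :
    pvQuery b qy (qx.toNat+1) qx 0 = pvScan pts qx qy := by
  obtain ⟨hshape, hbnd, hcell⟩ := hInv
  rw [pvQuery_eq b qy (by omega) qx.toNat qx rfl (by omega) (qx.toNat+1) 0 (by omega)]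
  have hcells : ∀ i ∈ pvDchain qx, ∀ j ∈ pvDchain qy, pvCell b i j = pvMaxCov pts i j := by
    intro i hi j hj
    obtain ⟨hi1, hi2⟩ := pvDchain_mem qx i hi
    obtain ⟨hj1, hj2⟩ := pvDchain_mem qy j hj
    exact hcell i j hi1 (by omega) hj1 (by omega)
  have hcong : (pvDchain qx).foldl (fun r i =>
      (pvDchain qy).foldl (fun r' j => if pvCell b i j > r' then pvCell b i j else r') r) 0
      = (pvDchain qx).foldl (fun r i =>
      (pvDchain qy).foldl (fun r' j => if pvMaxCov pts i j > r' then pvMaxCov pts i j else r') r) 0 := by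
    apply pv_foldl_congr
    intro i hi r
    apply pv_foldl_congr
    intro j hj r'
    rw [hcells i hi j hj]
  rw [hcong, pv_fold_pairs (pvMaxCov pts) (pvDchain qy) (pvDchain qx) 0]
  set pairs := (pvDchain qx).flatMap (fun i => (pvDchain qy).map (fun j => (i, j))) with hpairs
  rw [pv_fold_true, pv_scan_shape]
  apply le_antisymm
  · apply pv_fold_le
    · intro q hq _
      obtain ⟨i, hi, j, hj, rfl⟩ : ∃ i ∈ pvDchain qx, ∃ j ∈ pvDchain qy, (i, j) = q := by
        rw [hpairs] at hq
        obtain ⟨i, hi, hq2⟩ := List.mem_flatMap.mp hq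
        obtain ⟨j, hj, rfl⟩ := List.mem_map.mp hq2
        exact ⟨i, hi, j, hj, rfl⟩
      unfold pvMaxCov
      apply pv_fold_le
      · intro p hp hcov
        apply pv_fold_mem_le _ _ pts p hp
        obtain ⟨⟨hpi1, hpi2⟩, ⟨hpj1, hpj2⟩⟩ := hcov
        obtain ⟨hii1, hii2⟩ := pvDchain_mem qx i hi
        obtain ⟨hjj1, hjj2⟩ := pvDchain_mem qy j hj
        exact ⟨by omega, by omega⟩
      · apply pv_fold_le_self
    · apply pv_fold_le_self
  · apply pv_fold_le
    · intro p hp hcond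
      obtain ⟨hb1, hb2, hb3, hb4⟩ := hbnd p hp
      obtain ⟨i, hi, hcovi⟩ := pvDchain_cov p.1 (by omega) qx (by omega)
      obtain ⟨j, hj, hcovj⟩ := pvDchain_cov p.2.1 (by omega) qy (by omega)
      have hq : (i, j) ∈ pairs := by
        rw [hpairs]
        exact List.mem_flatMap.mpr ⟨i, hi, List.mem_map.mpr ⟨j, hj, rfl⟩⟩
      refine le_trans ?_ (pv_fold_mem_le _ _ pairs (i, j) hq trivial 0)
      show p.2.2 ≤ pvMaxCov pts i j
      exact pv_fold_mem_le _ _ pts p hp ⟨hcovi, hcovj⟩ 0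
    · apply pv_fold_le_self


theorem pvMaxCov_append (pts : List (Int × Int × Int)) (pt : Int × Int × Int) (i j : Int) :
    pvMaxCov (pts ++ [pt]) i j =
      if (pvCoversP i pt.1 ∧ pvCoversP j pt.2.1) ∧ pt.2.2 > pvMaxCov pts i j then pt.2.2
      else pvMaxCov pts i j := by
  unfold pvMaxCov
  rw [List.foldl_append]
  rfl

theorem pv_inv_step (X Y : Int) (b : List (List Int)) (pts : List (Int × Int × Int))
    (px py v : Int) (hInv : pvInv X Y b pts)
    (h1 : 1 ≤ px) (h2 : px ≤ X) (h3 : 1 ≤ py) (h4 : py ≤ Y) :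
    pvInv X Y (pvAdd X Y py v (X+2).toNat px b) (pts ++ [(px, py, v)]) := by
  obtain ⟨hshape, hbnd, hcell⟩ := hInv
  obtain ⟨hsh', hcell'⟩ := pvAdd_cell X Y py v (by omega) (X + 1 - px).toNat px rfl (by omega)
    ((X+2).toNat) b (by omega) hshape
  refine ⟨hsh', ?_, ?_⟩
  · intro p hp
    rcases List.mem_append.mp hp with hp | hp
    · exact hbnd p hp
    · rcases List.mem_singleton.mp hp with rfl
      exact ⟨h1, h2, h3, h4⟩
  · intro i j hi hiX hj hjY
    rw [hcell' i j hi hiX hj hjY, pvMaxCov_append, hcell i j hi hiX hj hjY]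
    have hix : (i ∈ pvUchain X px) ↔ pvCoversP i px :=
      pv_covers_iff_mem_uchain X i px (by omega) hiX
    have hjy : (j ∈ pvUchain Y py) ↔ pvCoversP j py :=
      pv_covers_iff_mem_uchain Y j py (by omega) hjY
    by_cases hcx : pvCoversP i px <;> by_cases hcy : pvCoversP j py
    · rw [if_pos ⟨hix.mpr hcx, hjy.mpr hcy⟩]
      by_cases hv : v > pvMaxCov pts i j
      · rw [if_pos hv, if_pos ⟨⟨hcx, hcy⟩, hv⟩]
      · rw [if_neg hv, if_neg (fun hc => hv hc.2)]
    · rw [if_neg (fun hc => hcy (hjy.mp hc.2)), if_neg (fun hc => hcy hc.1.2)]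
    · rw [if_neg (fun hc => hcx (hix.mp hc.1)), if_neg (fun hc => hcx hc.1.1)]
    · rw [if_neg (fun hc => hcx (hix.mp hc.1)), if_neg (fun hc => hcx hc.1.1)]

theorem pv_range_map_const (n : Nat) (r : List Int) :
    (List.range n).map (fun _ => r) = List.replicate n r := by
  induction n with
  | zero => rfl
  | succ k ih => rw [List.range_succ, List.map_append, ih, List.replicate_succ']; rfl

theorem pv_inv_init (X Y : Int) :
    pvInv X Y (List.replicate (X+2).toNat (List.replicate (Y+2).toNat (0:Int))) [] := by
  refine ⟨⟨by simp, ?_⟩, by simp, ?_⟩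
  · intro i hi
    rw [List.getD_eq_getElem?_getD, List.getElem?_replicate, if_pos hi]
    simp
  · intro i j hi hiX hj hjY
    unfold pvCell pvMaxCov
    simp only [List.foldl_nil]
    have hrow : (List.replicate (X + 2).toNat (List.replicate (Y + 2).toNat (0:Int))).getD i.toNat []
        = if i.toNat < (X+2).toNat then List.replicate (Y+2).toNat (0:Int) else [] := by
      rw [List.getD_eq_getElem?_getD, List.getElem?_replicate]
      split_ifs <;> rfl
    rw [hrow]
    split_ifs with h
    · rw [List.getD_eq_getElem?_getD, List.getElem?_replicate]
      split_ifs <;> rfl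
    · rfl

theorem pv_fold_rel {α σ τ : Type} (R : σ → τ → Prop) (f : σ → α → σ) (g : τ → α → τ) :
    ∀ (l : List α) (s : σ) (t : τ), R s t → (∀ x ∈ l, ∀ s t, R s t → R (f s x) (g t x)) →
    R (l.foldl f s) (l.foldl g t) := by
  intro l
  induction l with
  | nil => intro s t h _; exact h
  | cons x xs ih =>
      intro s t h hstep
      exact ih _ _ (hstep x (List.mem_cons_self ..) s t h)
        (fun z hz => hstep z (List.mem_cons_of_mem _ hz))

theorem pv_foldl_id {α β : Type} : ∀ (l : List α) (s : β), l.foldl (fun s _ => s) s = s := by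
  intro l
  induction l with
  | nil => intro s; rfl
  | cons x t ih => intro s; exact ih s

-- ===== VERDICT (by name: the statement is the Claim_ definition above) =====
theorem compute_gold_py_spec : Claim_equal_compute_gold_py := by
  unfold Claim_equal_compute_gold_py
  intro H K hDom hPre
  unfold Spec_compute_gold_py
  simp only [compute_gold_py, compute_gold_py_alt]
  by_cases hK : K < 0
  · rw [PySem.List.pyRange_neg_one_eq_nil (by omega : K ≤ -1)]
    simp only [List.foldl_nil]
    rw [pv_foldl_id, pv_foldl_id]
  · have hH : ∀ h ∈ H, 1 ≤ h := by
      rcases hPre with hPre | hPre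
      · omega
      · exact hPre
    cases hmax : PySem.List.max? H (fun x => x) with
    | none =>
        have hnil : H = [] := (PySem.List.max?_eq_none_iff H (fun x => x)).mp hmax
        subst hnil
        simp
    | some m =>
        rw [show (match (some m : Option Int) with | some x => x | none => 0) = m from rfl]
        have hle : ∀ h ∈ H, h ≤ m := by
          intro h hh
          simpa using PySem.List.max?_isMax hmax h hh
        refine (pv_fold_rel (fun (s : List (List Int) × Int) (t : List (Int × Int × Int) × Int) =>
            pvInv (K+1) (m+K) s.1 t.1 ∧ s.2 = t.2) _ _ H _ _
          ⟨by rw [pv_range_map_const]; exact pv_inv_init (K+1) (m+K), rfl⟩ ?_).2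
        intro h hh s t hR
        refine pv_fold_rel (fun (s : List (List Int) × Int) (t : List (Int × Int × Int) × Int) =>
            pvInv (K+1) (m+K) s.1 t.1 ∧ s.2 = t.2) _ _ _ s t hR ?_
        rintro j hj s' t' ⟨hInv', hans'⟩
        have hjb := (PySem.List.mem_pyRange_neg_one).mp hj
        have hh1 := hH h hh
        have hhm := hle h hh
        have hq : pvQuery s'.1 (h+j) ((j+1).toNat+1) (j+1) 0 = pvScan t'.1 (j+1) (h+j) :=
          pv_query_eq_scan (K+1) (m+K) (j+1) (h+j) s'.1 t'.1 hInv'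
            (by omega) (by omega) (by omega) (by omega)
        constructor
        · show pvInv (K+1) (m+K) _ _
          rw [hq]
          exact pv_inv_step (K+1) (m+K) s'.1 t'.1 (j+1) (h+j)
            (pvScan t'.1 (j+1) (h+j) + 1) hInv' (by omega) (by omega) (by omega) (by omega)
        · show (if _ > s'.2 then _ else s'.2) = (if _ > t'.2 then _ else t'.2)
          rw [hq, hans']
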